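-- pv_equiv track=rewrite | github.com/ivywong/aoc2023 | 03/03.py | has_neighboring_symbol
-- ===== SOURCE A (Python) =====
-- DIRECTIONS = [
--     (0, 1), (0, -1), (1, 0), (-1, 0), (-1, -1), (-1, 1), (1, -1), (1, 1)
-- ]
--
-- def has_neighboring_symbol(num_pos, symbols_dict):
--     num_row, num_start, num_end = num_pos
--
--     visited = set()
--     for num_col in range(num_start, num_end):
--         visited.add((num_row, num_col))
--         for dr, dc in DIRECTIONS:
--             neighbor = num_row + dr, num_col + dc
--             if neighbor not in visited and neighbor in symbols_dict:
--                 return True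
--             visited.add(neighbor)
--     return False
-- ===== SOURCE B (Python) =====
-- def has_neighboring_symbol(num_pos, symbols_dict):
--     num_row, num_start, num_end = num_pos
--     return any(
--         abs(sym_row - num_row) <= 1
--         and max(num_start, sym_col - 1) <= min(num_end - 1, sym_col + 1)
--         and not (sym_row == num_row and num_start <= sym_col < num_end)
--         for (sym_row, sym_col) in symbols_dict
--     )
-- ===== Notes on version B (the rewrite author's own statement) =====
-- stated objective: alternative
-- what changed: B replaces A's scan over every span column with a mutable visited set and early return by a single pass over the symbol table, testing each key arithmetically against the number's border box; Pre_ excludes inputs where a symbol key lies on one of the number's own cells, for on the intended grids symbol and digit cells are disjoint and which own cells A reports there (all but the leftmost) is an artefact of its visited-set insertion order, while B counts no own cell.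
-- outside the precondition, e.g. on has_neighboring_symbol((0, 0, 3), {(0, 1): '*'}): A returns True, B returns False; on has_neighboring_symbol((0, 0, 3), {(0, 0): '*'}): A returns False, B returns False
import Mathlib
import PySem

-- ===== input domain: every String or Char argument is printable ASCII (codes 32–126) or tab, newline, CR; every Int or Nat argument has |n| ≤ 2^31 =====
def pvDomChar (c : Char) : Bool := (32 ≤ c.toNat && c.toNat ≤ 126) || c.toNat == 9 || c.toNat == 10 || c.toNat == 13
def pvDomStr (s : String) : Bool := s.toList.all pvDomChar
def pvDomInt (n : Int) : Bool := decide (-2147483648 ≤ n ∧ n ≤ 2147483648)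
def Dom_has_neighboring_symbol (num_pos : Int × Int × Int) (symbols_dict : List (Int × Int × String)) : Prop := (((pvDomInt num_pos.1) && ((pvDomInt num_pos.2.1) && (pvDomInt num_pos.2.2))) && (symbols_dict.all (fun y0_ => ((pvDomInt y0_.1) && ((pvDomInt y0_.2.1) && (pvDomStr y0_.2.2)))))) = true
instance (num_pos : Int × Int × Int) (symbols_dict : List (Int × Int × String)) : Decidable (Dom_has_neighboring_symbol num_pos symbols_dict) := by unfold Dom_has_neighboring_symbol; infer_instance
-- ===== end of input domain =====

-- B replaces A's per-cell scan with a mutable visited set and early return by one pass over the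
-- symbol table, testing each key arithmetically against the number's border box; Pre_ excludes the
-- degenerate inputs where a symbol key lies on one of the number's own cells (see Pre_'s comment).


-- ===== PORT A =====
def hnsDirections : List (Int × Int) :=
  [(0, 1), (0, -1), (1, 0), (-1, 0), (-1, -1), (-1, 1), (1, -1), (1, 1)]

-- 'neighbor in symbols_dict' (dict membership = key membership)
def hnsKeyMem (symbols_dict : List (Int × Int × String)) (p : Int × Int) : Bool :=
  symbols_dict.any (fun t => (t.1, t.2.1) == p)

-- inner 'for dr, dc in DIRECTIONS' loop with its early return; returns (returned True?, visited)
-- Python's set is a hash set consumed only via membership/insert here, so it is modelled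
-- exactly by Std.HashSet (no iteration order is ever consumed).
def hnsInner (num_row num_col : Int) (symbols_dict : List (Int × Int × String)) :
    List (Int × Int) → Std.HashSet (Int × Int) → Bool × Std.HashSet (Int × Int)
  | [], visited => (false, visited)
  | d :: ds, visited =>
    let neighbor : Int × Int := (num_row + d.1, num_col + d.2)
    if visited.contains neighbor = false ∧ hnsKeyMem symbols_dict neighbor = true then
      (true, visited)
    else
      hnsInner num_row num_col symbols_dict ds (visited.insert neighbor)

-- outer 'for num_col in range(num_start, num_end)' loop
def hnsOuter (num_row : Int) (symbols_dict : List (Int × Int × String)) :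
    List Int → Std.HashSet (Int × Int) → Bool
  | [], _ => false
  | c :: cs, visited =>
    let visited := visited.insert (num_row, c)
    match hnsInner num_row c symbols_dict hnsDirections visited with
    | (true, _) => true
    | (false, visited') => hnsOuter num_row symbols_dict cs visited'

def has_neighboring_symbol (num_pos : Int × Int × Int) (symbols_dict : List (Int × Int × String)) : Bool :=
  hnsOuter num_pos.1 symbols_dict (PySem.List.pyRange num_pos.2.1 num_pos.2.2 1) ∅

-- ===== PORT B =====
def has_neighboring_symbol_alt (num_pos : Int × Int × Int) (symbols_dict : List (Int × Int × String)) : Bool :=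
  let num_row := num_pos.1
  let num_start := num_pos.2.1
  let num_end := num_pos.2.2
  symbols_dict.any (fun t =>
    decide ((t.1 - num_row).natAbs ≤ 1 ∧
            max num_start (t.2.1 - 1) ≤ min (num_end - 1) (t.2.1 + 1) ∧
            ¬ (t.1 = num_row ∧ num_start ≤ t.2.1 ∧ t.2.1 < num_end)))

-- ===== PRECONDITION & SPEC =====
-- Pre_ excludes inputs where a symbol key lies on one of the number's own cells (row num_row,
-- num_start <= col < num_end): on the intended grids symbol cells and digit cells are disjoint,
-- and which own cells A's interleaved visited-set scan happens to test there is an artefact of its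
-- insertion order (it reports every own cell except the leftmost), while B counts no own cell.
def Pre_has_neighboring_symbol (num_pos : Int × Int × Int) (symbols_dict : List (Int × Int × String)) : Prop :=
  ¬ ∃ t ∈ symbols_dict, t.1 = num_pos.1 ∧ num_pos.2.1 ≤ t.2.1 ∧ t.2.1 < num_pos.2.2
instance (num_pos : Int × Int × Int) (symbols_dict : List (Int × Int × String)) : Decidable (Pre_has_neighboring_symbol num_pos symbols_dict) := by unfold Pre_has_neighboring_symbol; infer_instance

def pvWitness_has_neighboring_symbol : (Int × Int × Int) × (List (Int × Int × String)) := ((0, 0, 3), [(1, 1, "*")])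

def Spec_has_neighboring_symbol (num_pos : Int × Int × Int) (symbols_dict : List (Int × Int × String)) (out : Bool) : Prop := out = has_neighboring_symbol_alt num_pos symbols_dict
instance (num_pos : Int × Int × Int) (symbols_dict : List (Int × Int × String)) (out : Bool) : Decidable (Spec_has_neighboring_symbol num_pos symbols_dict out) := by unfold Spec_has_neighboring_symbol; infer_instance

-- ===== CLAIM (what is proved, stated in full; the proofs are below) =====
def Claim_equal_has_neighboring_symbol : Prop := ∀ (num_pos : Int × Int × Int) (symbols_dict : List (Int × Int × String)), Dom_has_neighboring_symbol num_pos symbols_dict → Pre_has_neighboring_symbol num_pos symbols_dict → Spec_has_neighboring_symbol num_pos symbols_dict (has_neighboring_symbol num_pos symbols_dict)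

-- ===== LEMMAS AND PROOFS =====

-- neighbor predicate: Chebyshev-distance-1 neighbor of (r, c)
def hnsNbr (r c : Int) (p : Int × Int) : Prop :=
  p.1 - r ≤ 1 ∧ r - p.1 ≤ 1 ∧ p.2 - c ≤ 1 ∧ c - p.2 ≤ 1 ∧ ¬(p.1 = r ∧ p.2 = c)

-- closed ball: neighbor or the cell itself
def hnsBall (r c : Int) (p : Int × Int) : Prop :=
  p.1 - r ≤ 1 ∧ r - p.1 ≤ 1 ∧ p.2 - c ≤ 1 ∧ c - p.2 ≤ 1

-- a cell adjacent (Chebyshev distance 1) to some cell (row, x), num_start ≤ x < num_end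
def hnsSpanNbr (r s e : Int) (p : Int × Int) : Prop :=
  s < e ∧ ((p.1 ≠ r ∧ p.1 - r ≤ 1 ∧ r - p.1 ≤ 1 ∧ s - 1 ≤ p.2 ∧ p.2 ≤ e) ∨
           (p.1 = r ∧ ((s + 1 ≤ p.2 ∧ p.2 ≤ e) ∨ (s - 1 ≤ p.2 ∧ p.2 ≤ e - 2))))

-- the box A's scan can trigger on: the span's closed ball minus the span's leftmost cell
def hnsABox (r s e : Int) (p : Int × Int) : Prop :=
  s < e ∧ r - 1 ≤ p.1 ∧ p.1 ≤ r + 1 ∧ s - 1 ≤ p.2 ∧ p.2 ≤ e ∧ ¬(p.1 = r ∧ p.2 = s)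

-- the box B tests: the span's closed ball minus ALL span cells
def hnsBBox (r s e : Int) (p : Int × Int) : Prop :=
  s < e ∧ r - 1 ≤ p.1 ∧ p.1 ≤ r + 1 ∧ s - 1 ≤ p.2 ∧ p.2 ≤ e ∧ ¬(p.1 = r ∧ s ≤ p.2 ∧ p.2 < e)

lemma hset_mem_insert (m : Std.HashSet (Int × Int)) (x y : Int × Int) :
    y ∈ m.insert x ↔ y ∈ m ∨ y = x := by
  rw [Std.HashSet.mem_insert, beq_iff_eq]
  tauto

lemma hns_dirs_mem (r c : Int) (p : Int × Int) :
    (∃ d ∈ hnsDirections, p = (r + d.1, c + d.2)) ↔ hnsNbr r c p := by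
  obtain ⟨p1, p2⟩ := p
  constructor
  · rintro ⟨d, hd, hp⟩
    fin_cases hd <;> simp_all [hnsNbr, Prod.ext_iff]
  · rintro ⟨h1, h2, h3, h4, h5⟩
    refine ⟨(p1 - r, p2 - c), ?_, by simp⟩
    simp only [hnsDirections, List.mem_cons, List.not_mem_nil, or_false, Prod.mk.injEq]
    omega

lemma hns_ball_cases (r c : Int) (p : Int × Int) :
    hnsBall r c p ↔ p = (r, c) ∨ hnsNbr r c p := by
  obtain ⟨p1, p2⟩ := p
  simp [hnsBall, hnsNbr, Prod.ext_iff]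
  omega

lemma hns_keyMem_iff (dict : List (Int × Int × String)) (p : Int × Int) :
    hnsKeyMem dict p = true ↔ ∃ t ∈ dict, (t.1, t.2.1) = p := by
  simp [hnsKeyMem]

lemma hns_dirs_pairwise (r c : Int) :
    ∀ d₁ ∈ hnsDirections, ∀ d₂ ∈ hnsDirections, d₁ ≠ d₂ →
      (r + d₁.1, c + d₁.2) ≠ (r + d₂.1, c + d₂.2) := by
  intro d₁ h₁ d₂ h₂ hne
  fin_cases h₁ <;> fin_cases h₂ <;> simp_all [Prod.ext_iff]

lemma hns_dirs_nodup : hnsDirections.Nodup := by decide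

-- the inner loop returns True iff some direction's neighbor is an unvisited symbol
-- (distinctness of the neighbors makes the interleaved visited.add irrelevant)
lemma hns_inner_fst (r c : Int) (dict : List (Int × Int × String)) :
    ∀ (ds : List (Int × Int)) (V : Std.HashSet (Int × Int)),
      (∀ d₁ ∈ ds, ∀ d₂ ∈ ds, d₁ ≠ d₂ → (r + d₁.1, c + d₁.2) ≠ (r + d₂.1, c + d₂.2)) →
      ds.Nodup →
      ((hnsInner r c dict ds V).1 = true ↔
        ∃ d ∈ ds, hnsKeyMem dict (r + d.1, c + d.2) = true ∧ (r + d.1, c + d.2) ∉ V) := by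
  intro ds
  induction ds with
  | nil => intro V _ _; simp [hnsInner]
  | cons d ds ih =>
    intro V hdist hnd
    simp only [hnsInner]
    by_cases hc : V.contains (r + d.1, c + d.2) = false ∧
        hnsKeyMem dict (r + d.1, c + d.2) = true
    · rw [if_pos hc]
      constructor
      · intro _
        refine ⟨d, List.mem_cons_self .., hc.2, fun hm => ?_⟩
        have hcv : V.contains (r + d.1, c + d.2) = true :=
          Std.HashSet.contains_iff_mem.2 hm
        rw [hcv] at hc
        exact absurd hc.1 (by decide)
      · intro _; rfl
    · rw [if_neg hc]
      have hnd' := List.nodup_cons.1 hnd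
      rw [ih (V.insert (r + d.1, c + d.2))
        (fun d₁ h₁ d₂ h₂ => hdist d₁ (List.mem_cons_of_mem _ h₁) d₂ (List.mem_cons_of_mem _ h₂))
        hnd'.2]
      constructor
      · rintro ⟨d', hd', hk, hnv⟩
        refine ⟨d', List.mem_cons_of_mem _ hd', hk, fun hm => hnv ?_⟩
        rw [hset_mem_insert]
        exact Or.inl hm
      · rintro ⟨d', hd', hk, hnv⟩
        rcases List.mem_cons.1 hd' with rfl | hd'
        · exfalso
          rcases not_and_or.1 hc with h | h
          · have hcv : V.contains (r + d'.1, c + d'.2) = true := by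
              cases hcv : V.contains (r + d'.1, c + d'.2) with
              | false => exact absurd hcv h
              | true => rfl
            exact hnv (Std.HashSet.contains_iff_mem.1 hcv)
          · exact h hk
        · refine ⟨d', hd', hk, fun hm => hnv ?_⟩
          rw [hset_mem_insert] at hm
          rcases hm with hm | hm
          · exact hm
          · exact absurd hm (hdist d' (List.mem_cons_of_mem _ hd') d (List.mem_cons_self ..)
              (fun h => hnd'.1 (h ▸ hd')))

-- when the inner loop falls through, visited has grown by exactly the 8 neighbors
lemma hns_inner_snd (r c : Int) (dict : List (Int × Int × String)) :
    ∀ (ds : List (Int × Int)) (V : Std.HashSet (Int × Int)),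
      (hnsInner r c dict ds V).1 = false →
      ∀ p, p ∈ (hnsInner r c dict ds V).2 ↔ p ∈ V ∨ ∃ d ∈ ds, p = (r + d.1, c + d.2) := by
  intro ds
  induction ds with
  | nil => intro V _ p; simp [hnsInner]
  | cons d ds ih =>
    intro V hf p
    simp only [hnsInner] at hf ⊢
    by_cases hc : V.contains (r + d.1, c + d.2) = false ∧
        hnsKeyMem dict (r + d.1, c + d.2) = true
    · rw [if_pos hc] at hf; simp at hf
    · rw [if_neg hc] at hf ⊢
      rw [ih _ hf p, hset_mem_insert]
      constructor
      · rintro (⟨h | h⟩ | ⟨d', hd', h⟩)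
        · exact Or.inl h
        · exact Or.inr ⟨d, List.mem_cons_self .., h⟩
        · exact Or.inr ⟨d', List.mem_cons_of_mem _ hd', h⟩
      · rintro (h | ⟨d', hd', h⟩)
        · exact Or.inl (Or.inl h)
        · rcases List.mem_cons.1 hd' with rfl | hd'
          · exact Or.inl (Or.inr h)
          · exact Or.inr ⟨d', hd', h⟩

-- the A-loop trigger set, scanning from column lo with visited = ball of [s, lo)
def hnsTrigFrom (r s e lo : Int) (p : Int × Int) : Prop :=
  ∃ x, lo ≤ x ∧ x < e ∧ hnsNbr r x p ∧ ¬ ∃ y, s ≤ y ∧ y < x ∧ hnsBall r y p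

lemma hns_outer_iff (r s e : Int) (dict : List (Int × Int × String)) :
    ∀ (k : Nat) (V : Std.HashSet (Int × Int)),
      s ≤ e - k →
      (∀ p, p ∈ V ↔ ∃ x, s ≤ x ∧ x < e - k ∧ hnsBall r x p) →
      (hnsOuter r dict (PySem.List.pyRange (e - k) e 1) V = true ↔
        ∃ t ∈ dict, hnsTrigFrom r s e (e - k) (t.1, t.2.1)) := by
  intro k
  induction k with
  | zero =>
    intro V _ _
    simp only [Nat.cast_zero, sub_zero]
    have hnil : PySem.List.pyRange e e 1 = [] := by
      rw [PySem.List.pyRange_one]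
      simp
    rw [hnil]
    simp only [hnsOuter, hnsTrigFrom]
    constructor
    · intro h; exact absurd h (by simp)
    · rintro ⟨t, _, x, hx1, hx2, _⟩; omega
  | succ k ih =>
    intro V hse hV
    have hlo : e - ((k : Int) + 1) < e := by omega
    have hcast : ((k + 1 : Nat) : Int) = (k : Int) + 1 := by push_cast; ring
    rw [hcast] at hse hV ⊢
    set lo : Int := e - ((k : Int) + 1) with hlodef
    rw [PySem.List.pyRange_one_cons hlo]
    simp only [hnsOuter]
    have hV' : ∀ p, p ∈ V.insert (r, lo) ↔
        (∃ x, s ≤ x ∧ x < lo ∧ hnsBall r x p) ∨ p = (r, lo) := by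
    -- visited after 'visited.add((num_row, num_col))'
      intro p
      rw [hset_mem_insert, hV]
    have hfst := hns_inner_fst r lo dict hnsDirections (V.insert (r, lo))
      (hns_dirs_pairwise r lo) hns_dirs_nodup
    -- the trigger condition at column lo, stated over dict entries
    have htrig_lo : (∃ d ∈ hnsDirections, hnsKeyMem dict (r + d.1, lo + d.2) = true ∧
          (r + d.1, lo + d.2) ∉ V.insert (r, lo)) ↔
        ∃ t ∈ dict, hnsNbr r lo (t.1, t.2.1) ∧
          ¬ ∃ y, s ≤ y ∧ y < lo ∧ hnsBall r y (t.1, t.2.1) := by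
      constructor
      · rintro ⟨d, hd, hk, hnv⟩
        rcases (hns_keyMem_iff dict _).1 hk with ⟨t, ht, hteq⟩
        have hnbr : hnsNbr r lo (t.1, t.2.1) := by
          rw [hteq]; exact (hns_dirs_mem r lo _).1 ⟨d, hd, rfl⟩
        refine ⟨t, ht, hnbr, ?_⟩
        rintro ⟨y, hy1, hy2, hb⟩
        exact hnv ((hV' _).2 (Or.inl ⟨y, hy1, hy2, by rw [← hteq]; exact hb⟩))
      · rintro ⟨t, ht, hnbr, hnoball⟩
        rcases (hns_dirs_mem r lo (t.1, t.2.1)).2 hnbr with ⟨d, hd, hdeq⟩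
        refine ⟨d, hd, ?_, ?_⟩
        · rw [hns_keyMem_iff]; exact ⟨t, ht, hdeq⟩
        · rw [← hdeq]
          intro hm
          rcases (hV' _).1 hm with ⟨y, hy1, hy2, hb⟩ | heq
          · exact hnoball ⟨y, hy1, hy2, hb⟩
          · rcases hnbr with ⟨_, _, _, _, hne⟩
            exact hne ⟨congrArg Prod.fst heq, congrArg Prod.snd heq⟩
    rcases hres : hnsInner r lo dict hnsDirections (V.insert (r, lo)) with ⟨b, V''⟩
    rw [hres] at hfst
    cases b with
    | true =>
      simp only [true_iff]
      rcases htrig_lo.1 (hfst.1 rfl) with ⟨t, ht, hnbr, hnoball⟩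
      exact ⟨t, ht, lo, le_refl _, hlo, hnbr, hnoball⟩
    | false =>
      have hsnd := hns_inner_snd r lo dict hnsDirections (V.insert (r, lo)) (by rw [hres])
      have hV'' : ∀ p, p ∈ V'' ↔ ∃ x, s ≤ x ∧ x < lo + 1 ∧ hnsBall r x p := by
        intro p
        have h := hsnd p
        rw [hres] at h
        refine Iff.trans h ?_
        rw [hV' p, hns_dirs_mem r lo p]
        constructor
        · intro hyp
          rcases hyp with hyp1 | hnbr
          · rcases hyp1 with ⟨x, hx1, hx2, hb⟩ | heq
            · exact ⟨x, hx1, by omega, hb⟩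
            · exact ⟨lo, by omega, by omega, (hns_ball_cases r lo p).2 (Or.inl heq)⟩
          · exact ⟨lo, by omega, by omega, (hns_ball_cases r lo p).2 (Or.inr hnbr)⟩
        · rintro ⟨x, hx1, hx2, hb⟩
          by_cases hxlo : x < lo
          · exact Or.inl (Or.inl ⟨x, hx1, hxlo, hb⟩)
          · have : x = lo := by omega
            subst this
            rcases (hns_ball_cases r lo p).1 hb with heq | hnbr
            · exact Or.inl (Or.inr heq)
            · exact Or.inr hnbr
      have heq : e - (k : Int) = lo + 1 := by omega
      have := ih V'' (by omega) (by rw [heq]; exact hV'')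
      rw [heq] at this
      rw [this]
      -- trigFrom lo ↔ trigFrom (lo+1), given no trigger fires at lo
      have hnotrig : ¬ ∃ t ∈ dict, hnsNbr r lo (t.1, t.2.1) ∧
          ¬ ∃ y, s ≤ y ∧ y < lo ∧ hnsBall r y (t.1, t.2.1) := by
        intro h
        have : (false : Bool) = true := hfst.2 (htrig_lo.2 h)
        simp at this
      constructor
      · rintro ⟨t, ht, x, hx1, hx2, hnbr, hnoball⟩
        exact ⟨t, ht, x, by omega, hx2, hnbr, hnoball⟩
      · rintro ⟨t, ht, x, hx1, hx2, hnbr, hnoball⟩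
        by_cases hxlo : lo + 1 ≤ x
        · exact ⟨t, ht, x, hxlo, hx2, hnbr, hnoball⟩
        · have : x = lo := by omega
          subst this
          exact absurd ⟨t, ht, hnbr, hnoball⟩ hnotrig

-- scanning the whole span, the trigger set is: span-neighbor and not the leftmost own cell
lemma hns_trigFrom_s (r s e : Int) (p : Int × Int) (hse : s < e) :
    hnsTrigFrom r s e s p ↔ (∃ x, s ≤ x ∧ x < e ∧ hnsNbr r x p) ∧ ¬ (p.1 = r ∧ p.2 = s) := by
  obtain ⟨p1, p2⟩ := p
  simp only [hnsTrigFrom, hnsNbr, hnsBall] at *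
  constructor
  · rintro ⟨x, hx1, hx2, hnbr, hnoball⟩
    refine ⟨⟨x, hx1, hx2, hnbr⟩, ?_⟩
    rintro ⟨hpr, hps⟩
    obtain ⟨n1, n2, n3, n4, n5⟩ := hnbr
    apply hnoball
    refine ⟨s, by omega, by omega, by omega, by omega, by omega, by omega⟩
  · rintro ⟨⟨x0, hx01, hx02, hnbr0⟩, hne⟩
    by_cases h1 : s ≤ p2 - 1 ∧ p2 - 1 < e ∧ ¬(p1 = r ∧ p2 = p2 - 1)
    · refine ⟨p2 - 1, h1.1, h1.2.1, ⟨by omega, by omega, by omega, by omega, h1.2.2⟩, ?_⟩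
      rintro ⟨y, hy1, hy2, hb⟩
      omega
    · by_cases h2 : s ≤ p2 ∧ p2 < e ∧ ¬(p1 = r)
      · refine ⟨p2, h2.1, h2.2.1, ⟨by omega, by omega, by omega, by omega, by omega⟩, ?_⟩
        rintro ⟨y, hy1, hy2, hb⟩
        apply h1
        omega
      · have hx0 : x0 = p2 + 1 := by omega
        subst hx0
        refine ⟨p2 + 1, by omega, by omega, hnbr0, ?_⟩
        rintro ⟨y, hy1, hy2, hb⟩
        omega

-- closed form of "neighbor of some span cell"
lemma hns_spanNbr_iff (r s e : Int) (p : Int × Int) :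
    (s < e ∧ ∃ x, s ≤ x ∧ x < e ∧ hnsNbr r x p) ↔ hnsSpanNbr r s e p := by
  obtain ⟨p1, p2⟩ := p
  simp only [hnsNbr, hnsSpanNbr]
  constructor
  · rintro ⟨hse, x, hx1, hx2, h1, h2, h3, h4, h5⟩
    refine ⟨hse, ?_⟩
    by_cases hp : p1 = r
    · subst hp
      right
      refine ⟨rfl, ?_⟩
      omega
    · left
      exact ⟨hp, by omega, by omega, by omega, by omega⟩
  · rintro ⟨hse, h | h⟩
    · obtain ⟨h1, h2, h3, h4, h5⟩ := h
      refine ⟨hse, max s (p2 - 1), ?_, ?_, ?_, ?_, ?_, ?_, ?_⟩ <;> omega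
    · obtain ⟨rfl, h | h⟩ := h
      · exact ⟨hse, p2 - 1, by omega, by omega, by omega, by omega, by omega, by omega, by omega⟩
      · exact ⟨hse, p2 + 1, by omega, by omega, by omega, by omega, by omega, by omega, by omega⟩

-- A's trigger set in closed box form
lemma hns_spanNbr_box (r s e : Int) (p : Int × Int) :
    (hnsSpanNbr r s e p ∧ ¬ (p.1 = r ∧ p.2 = s)) ↔ hnsABox r s e p := by
  obtain ⟨p1, p2⟩ := p
  simp only [hnsSpanNbr, hnsABox]
  omega

-- characterisation of port A
lemma hns_A_iff (num_pos : Int × Int × Int) (dict : List (Int × Int × String)) :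
    has_neighboring_symbol num_pos dict = true ↔
      ∃ t ∈ dict, hnsABox num_pos.1 num_pos.2.1 num_pos.2.2 (t.1, t.2.1) := by
  obtain ⟨r, s, e⟩ := num_pos
  simp only [has_neighboring_symbol]
  by_cases hse : s < e
  · have hk : e - ((e - s).toNat : Int) = s := by omega
    have h := hns_outer_iff r s e dict (e - s).toNat ∅ (by omega)
      (by
        intro p
        constructor
        · intro hmem
          exact absurd hmem (by simp)
        · rintro ⟨x, hx1, hx2, _⟩
          omega)
    rw [hk] at h
    rw [h]
    constructor
    · rintro ⟨t, ht, htrig⟩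
      rcases (hns_trigFrom_s r s e _ hse).1 htrig with ⟨⟨x, hx1, hx2, hnbr⟩, hne⟩
      exact ⟨t, ht, (hns_spanNbr_box r s e _).1
        ⟨(hns_spanNbr_iff r s e _).1 ⟨hse, x, hx1, hx2, hnbr⟩, hne⟩⟩
    · rintro ⟨t, ht, hbox⟩
      rcases (hns_spanNbr_box r s e _).2 hbox with ⟨hspan, hne⟩
      rcases (hns_spanNbr_iff r s e _).2 hspan with ⟨_, x, hx1, hx2, hnbr⟩
      exact ⟨t, ht, (hns_trigFrom_s r s e _ hse).2 ⟨⟨x, hx1, hx2, hnbr⟩, hne⟩⟩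
  · have : PySem.List.pyRange s e 1 = [] := by
      rw [PySem.List.pyRange_one]
      have : (e - s).toNat = 0 := by omega
      rw [this]
      simp
    rw [this]
    simp only [hnsOuter]
    constructor
    · intro h; exact absurd h (by simp)
    · rintro ⟨t, _, hlt, _⟩; omega

-- characterisation of port B
lemma hns_B_iff (num_pos : Int × Int × Int) (dict : List (Int × Int × String)) :
    has_neighboring_symbol_alt num_pos dict = true ↔
      ∃ t ∈ dict, hnsBBox num_pos.1 num_pos.2.1 num_pos.2.2 (t.1, t.2.1) := by
  obtain ⟨r, s, e⟩ := num_pos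
  simp only [has_neighboring_symbol_alt, List.any_eq_true, decide_eq_true_eq]
  refine exists_congr fun t => and_congr_right fun _ => ?_
  simp only [hnsBBox]
  omega

-- ===== VERDICT (by name: the statement is the Claim_ definition above) =====
theorem has_neighboring_symbol_spec : Claim_equal_has_neighboring_symbol := by
  intro num_pos dict _ hpre
  obtain ⟨r, s, e⟩ := num_pos
  unfold Pre_has_neighboring_symbol at hpre
  dsimp only at hpre
  show has_neighboring_symbol (r, s, e) dict = has_neighboring_symbol_alt (r, s, e) dict
  rw [Bool.eq_iff_iff, hns_A_iff, hns_B_iff]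
  simp only [hnsABox, hnsBBox]
  constructor
  · rintro ⟨t, ht, h⟩
    have hp : ¬ (t.1 = r ∧ s ≤ t.2.1 ∧ t.2.1 < e) := fun hh => hpre ⟨t, ht, hh⟩
    exact ⟨t, ht, by omega⟩
  · rintro ⟨t, ht, h⟩
    exact ⟨t, ht, by omega⟩
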